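-- pv_equiv track=rewrite | github.com/Brndn004/squatting_in_the_texting_rack | nutrition/scripts/ingredient_management.py | _rank_matches
-- ===== SOURCE A (Python) =====
-- import typing
--
-- def _rank_matches(query: str, lookup_data: typing.Dict[str, int]) -> typing.List[typing.Tuple[int, str, int]]:
--     """Rank ingredient matches by relevance.
--
--     Args:
--         query: Search query (lowercased).
--         lookup_data: Dictionary mapping descriptions to FDC IDs.
--
--     Returns:
--         List of tuples (score, description, fdc_id) sorted by score (highest first).
--         Score: 3 = exact match, 2 = starts with, 1 = contains, 0 = no match.
--     """
--     query_lower = query.lower()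
--     matches = []
--
--     for description, fdc_id in lookup_data.items():
--         desc_lower = description.lower()
--         score = 0
--
--         if desc_lower == query_lower:
--             score = 3  # Exact match
--         elif desc_lower.startswith(query_lower):
--             score = 2  # Starts with query
--         elif query_lower in desc_lower:
--             score = 1  # Contains query
--
--         if score > 0:
--             matches.append((score, description, fdc_id))
--
--     # Sort by score (descending), then by description (ascending)
--     matches.sort(key=lambda x: (-x[0], x[1]))
--     return matches
-- ===== SOURCE B (Python) =====
-- import typing
--
-- def _rank_matches(query: str, lookup_data: typing.Dict[str, int]) -> typing.List[typing.Tuple[int, str, int]]: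
--     """Bucket matches by score in one pass, then sort each bucket by description."""
--     query_lower = query.lower()
--     exact, prefixed, contained = [], [], []
--     for description, fdc_id in lookup_data.items():
--         desc_lower = description.lower()
--         if desc_lower == query_lower:
--             exact.append((description, fdc_id))
--         elif desc_lower.startswith(query_lower):
--             prefixed.append((description, fdc_id))
--         elif query_lower in desc_lower:
--             contained.append((description, fdc_id))
--     result = []
--     for score, bucket in ((3, exact), (2, prefixed), (1, contained)):
--         for description, fdc_id in sorted(bucket):
--             result.append((score, description, fdc_id))
--     return result
-- ===== Notes on version B (the rewrite author's own statement) =====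
-- stated objective: alternative
-- what changed: Replaces A's collect-then-sort under the compound key (-score, description) by a one-pass distribution into three score buckets that are each sorted by description alone and concatenated high-score-first.
import Mathlib
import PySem

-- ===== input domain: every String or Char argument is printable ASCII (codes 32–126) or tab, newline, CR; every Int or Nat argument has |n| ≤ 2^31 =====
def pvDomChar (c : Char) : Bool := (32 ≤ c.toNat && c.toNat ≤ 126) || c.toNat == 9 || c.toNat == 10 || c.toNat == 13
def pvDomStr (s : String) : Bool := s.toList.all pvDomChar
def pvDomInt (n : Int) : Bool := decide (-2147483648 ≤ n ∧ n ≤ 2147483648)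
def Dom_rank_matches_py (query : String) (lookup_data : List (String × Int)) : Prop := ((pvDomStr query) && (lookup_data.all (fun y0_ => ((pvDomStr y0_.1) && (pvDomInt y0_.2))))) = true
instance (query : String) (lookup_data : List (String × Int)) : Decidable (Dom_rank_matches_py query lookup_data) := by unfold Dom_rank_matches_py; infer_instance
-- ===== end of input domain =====

-- B replaces A's single sort under the compound key (-score, description) by three score
-- buckets filled in one pass and sorted by description independently (objective: alternative
-- decomposition, same cost).

-- ===== PORT A =====
-- literal port of _rank_matches: score every dict item, collect positives, then one
-- stable sort under the tuple key (-score, description) (Int ×ₗ String carries exactly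
-- Python's lexicographic tuple order).
def rank_matches_py (query : String) (lookup_data : List (String × Int)) : List (Int × String × Int) :=
  let query_lower := PySem.Str.lower query
  let matchList := (PySem.Dict.ofList lookup_data).items.foldl
    (fun acc p =>
      let desc_lower := PySem.Str.lower p.1
      let score : Int :=
        if desc_lower == query_lower then 3
        else if PySem.Str.startswith desc_lower query_lower then 2
        else if PySem.Str.isIn query_lower desc_lower then 1
        else 0
      if score > 0 then acc ++ [(score, p.1, p.2)] else acc) []
  PySem.List.sorted matchList (fun x => (toLex (-x.1, x.2.1) : Int ×ₗ String))

-- ===== PORT B =====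
-- port of Source B: one pass distributing items into the three buckets, then each bucket is
-- sorted by Python's tuple order on (description, fdc_id) and emitted high score first.
def rank_matches_py_alt (query : String) (lookup_data : List (String × Int)) : List (Int × String × Int) :=
  let query_lower := PySem.Str.lower query
  let bs := (PySem.Dict.ofList lookup_data).items.foldl
    (fun (bs : List (String × Int) × List (String × Int) × List (String × Int)) p =>
      let desc_lower := PySem.Str.lower p.1
      if desc_lower == query_lower then (bs.1 ++ [p], bs.2.1, bs.2.2)
      else if PySem.Str.startswith desc_lower query_lower then (bs.1, bs.2.1 ++ [p], bs.2.2)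
      else if PySem.Str.isIn query_lower desc_lower then (bs.1, bs.2.1, bs.2.2 ++ [p])
      else bs) ([], [], [])
  (PySem.List.sorted bs.1 (fun p => (toLex p : String ×ₗ Int))).map (fun p => ((3 : Int), p.1, p.2))
  ++ (PySem.List.sorted bs.2.1 (fun p => (toLex p : String ×ₗ Int))).map (fun p => ((2 : Int), p.1, p.2))
  ++ (PySem.List.sorted bs.2.2 (fun p => (toLex p : String ×ₗ Int))).map (fun p => ((1 : Int), p.1, p.2))

-- ===== PRECONDITION & SPEC =====
def Spec_rank_matches_py (query : String) (lookup_data : List (String × Int)) (out : List (Int × String × Int)) : Prop := out = rank_matches_py_alt query lookup_data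
instance (query : String) (lookup_data : List (String × Int)) (out : List (Int × String × Int)) : Decidable (Spec_rank_matches_py query lookup_data out) := by unfold Spec_rank_matches_py; infer_instance

-- ===== CLAIM (what is proved, stated in full; the proofs are below) =====
def Claim_equal_rank_matches_py : Prop := ∀ (query : String) (lookup_data : List (String × Int)), Dom_rank_matches_py query lookup_data → Spec_rank_matches_py query lookup_data (rank_matches_py query lookup_data)

-- ===== LEMMAS AND PROOFS =====

-- the three mutually exclusive match predicates, score, tag and the compound sort key
def pvF3 (ql : String) (p : String × Int) : Bool := PySem.Str.lower p.1 == ql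
def pvF2 (ql : String) (p : String × Int) : Bool :=
  !(pvF3 ql p) && PySem.Str.startswith (PySem.Str.lower p.1) ql
def pvF1 (ql : String) (p : String × Int) : Bool :=
  !(pvF3 ql p) && !(PySem.Str.startswith (PySem.Str.lower p.1) ql) && PySem.Str.isIn ql (PySem.Str.lower p.1)
def pvOr (ql : String) (p : String × Int) : Bool := pvF3 ql p || pvF2 ql p || pvF1 ql p
def pvScore (ql : String) (p : String × Int) : Int :=
  if PySem.Str.lower p.1 == ql then 3
  else if PySem.Str.startswith (PySem.Str.lower p.1) ql then 2
  else if PySem.Str.isIn ql (PySem.Str.lower p.1) then 1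
  else 0
def pvTag (ql : String) (p : String × Int) : Int × String × Int := (pvScore ql p, p.1, p.2)
def pvKeyA (x : Int × String × Int) : Int ×ₗ String := toLex (-x.1, x.2.1)

lemma pvFoldA (ql : String) (xs : List (String × Int)) (acc : List (Int × String × Int)) :
    xs.foldl
      (fun acc p =>
        let desc_lower := PySem.Str.lower p.1
        let score : Int :=
          if desc_lower == ql then 3
          else if PySem.Str.startswith desc_lower ql then 2
          else if PySem.Str.isIn ql desc_lower then 1
          else 0
        if score > 0 then acc ++ [(score, p.1, p.2)] else acc) acc
    = acc ++ (xs.filter (pvOr ql)).map (pvTag ql) := by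
  have hstep : (fun (acc : List (Int × String × Int)) (p : String × Int) =>
      let desc_lower := PySem.Str.lower p.1
      let score : Int :=
        if desc_lower == ql then 3
        else if PySem.Str.startswith desc_lower ql then 2
        else if PySem.Str.isIn ql desc_lower then 1
        else 0
      if score > 0 then acc ++ [(score, p.1, p.2)] else acc)
      = fun acc p => if pvOr ql p = true then acc ++ [pvTag ql p] else acc := by
    funext acc p
    simp only [pvOr, pvF3, pvF2, pvF1, pvTag, pvScore]
    by_cases h3 : PySem.Str.lower p.1 == ql <;>
      by_cases h2 : PySem.Str.startswith (PySem.Str.lower p.1) ql <;>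
        by_cases h1 : PySem.Str.isIn ql (PySem.Str.lower p.1) <;>
          simp [h3] <;> simp_all
  rw [hstep, PySem.List.foldl_append_if]

lemma pvFoldB (ql : String) (xs : List (String × Int))
    (bs : List (String × Int) × List (String × Int) × List (String × Int)) :
    xs.foldl
      (fun (bs : List (String × Int) × List (String × Int) × List (String × Int)) p =>
        let desc_lower := PySem.Str.lower p.1
        if desc_lower == ql then (bs.1 ++ [p], bs.2.1, bs.2.2)
        else if PySem.Str.startswith desc_lower ql then (bs.1, bs.2.1 ++ [p], bs.2.2)
        else if PySem.Str.isIn ql desc_lower then (bs.1, bs.2.1, bs.2.2 ++ [p])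
        else bs) bs
    = (bs.1 ++ xs.filter (pvF3 ql), bs.2.1 ++ xs.filter (pvF2 ql), bs.2.2 ++ xs.filter (pvF1 ql)) := by
  induction xs generalizing bs with
  | nil => simp
  | cons p t ih =>
    simp only [List.foldl_cons, List.filter_cons]
    by_cases h3 : PySem.Str.lower p.1 == ql <;>
      by_cases h2 : PySem.Str.startswith (PySem.Str.lower p.1) ql <;>
        by_cases h1 : PySem.Str.isIn ql (PySem.Str.lower p.1) <;>
          simp only [pvF3, pvF2, pvF1, h3, h2, h1, ih] <;> simp

lemma pvPermFilter (ql : String) (xs : List (String × Int)) :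
    (xs.filter (pvOr ql)).Perm
      (xs.filter (pvF3 ql) ++ xs.filter (pvF2 ql) ++ xs.filter (pvF1 ql)) := by
  induction xs with
  | nil => simp
  | cons p t ih =>
    by_cases h3 : pvF3 ql p
    · have h2 : pvF2 ql p = false := by simp [pvF2, h3]
      have h1 : pvF1 ql p = false := by simp [pvF1, h3]
      have hor : pvOr ql p = true := by simp [pvOr, h3]
      simp only [List.filter_cons, hor, h3, h2, h1, if_true, Bool.false_eq_true, if_false]
      simpa using ih.cons p
    · by_cases h2 : pvF2 ql p
      · have h1 : pvF1 ql p = false := by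
          have hsw : PySem.Chars.startswith (PySem.Chars.lower p.1.toList) ql.toList = true := by
            simp [pvF2] at h2; exact h2.2
          simp [pvF1, hsw]
        have hor : pvOr ql p = true := by simp [pvOr, h2]
        simp only [List.filter_cons, hor, h3, h2, h1, if_true, Bool.false_eq_true, if_false]
        refine (ih.cons p).trans ?_
        simpa [List.append_assoc] using
          (List.perm_middle (a := p) (l₁ := t.filter (pvF3 ql))
            (l₂ := t.filter (pvF2 ql) ++ t.filter (pvF1 ql))).symm
      · by_cases h1 : pvF1 ql p
        · have hor : pvOr ql p = true := by simp [pvOr, h1]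
          simp only [List.filter_cons, hor, h3, h2, h1, if_true, Bool.false_eq_true, if_false]
          refine (ih.cons p).trans ?_
          simp only [List.append_assoc]
          simpa [List.append_assoc] using
            (List.perm_middle (a := p)
              (l₁ := t.filter (pvF3 ql) ++ t.filter (pvF2 ql))
              (l₂ := t.filter (pvF1 ql))).symm
        · have hor : pvOr ql p = false := by simp [pvOr, h3, h2, h1]
          simpa [List.filter_cons, hor, h3, h2, h1] using ih

lemma pvScoreF3 (ql : String) (p : String × Int) (h : pvF3 ql p = true) : pvScore ql p = 3 := by
  simp [pvF3] at h; simp [pvScore, h]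
lemma pvScoreF2 (ql : String) (p : String × Int) (h : pvF2 ql p = true) : pvScore ql p = 2 := by
  simp [pvF2, pvF3] at h; simp [pvScore, h.1, h.2]
lemma pvScoreF1 (ql : String) (p : String × Int) (h : pvF1 ql p = true) : pvScore ql p = 1 := by
  simp [pvF1, pvF3, and_assoc] at h; obtain ⟨h1, h2, h3⟩ := h; simp [pvScore, h1, h2, h3]

-- a sorted bucket with pairwise-distinct descriptions, tagged with the constant score i,
-- is strictly increasing under the compound key
lemma pvBlockPairwise (i : Int) (b : List (String × Int)) (hnd : (b.map Prod.fst).Nodup) :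
    ((PySem.List.sorted b (fun p => (toLex p : String ×ₗ Int))).map
      (fun p => (i, p.1, p.2))).Pairwise (fun a b => pvKeyA a < pvKeyA b) := by
  rw [List.pairwise_map]
  have hle := PySem.List.sorted_pairwise b (fun p => (toLex p : String ×ₗ Int))
  have hnd' : ((PySem.List.sorted b (fun p => (toLex p : String ×ₗ Int))).map Prod.fst).Nodup := by
    refine ((PySem.List.sorted_perm b (fun p => (toLex p : String ×ₗ Int)) false).map
      Prod.fst).nodup_iff.mpr hnd
  have hne := List.pairwise_map.mp hnd'
  refine (hle.and hne).imp ?_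
  rintro p q ⟨hpq, hne'⟩
  have h1 : p.1 < q.1 := by
    rcases Prod.Lex.le_iff.mp hpq with h | h
    · exact h
    · exact absurd h.1 hne'
  exact Prod.Lex.lt_iff.mpr (Or.inr ⟨rfl, h1⟩)

-- every element of a tagged block carries its block's score
lemma pvBlockScore (i : Int) (b : List (String × Int)) (a : Int × String × Int)
    (ha : a ∈ (PySem.List.sorted b (fun p => (toLex p : String ×ₗ Int))).map
      (fun p => (i, p.1, p.2))) : a.1 = i := by
  rcases List.mem_map.mp ha with ⟨p, _, rfl⟩; rfl

lemma pvKeyLtOfScoreGt (a b : Int × String × Int) (h : b.1 < a.1) : pvKeyA a < pvKeyA b :=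
  Prod.Lex.lt_iff.mpr (Or.inl (by simp [pvKeyA]; omega))

theorem rank_matches_py_spec : Claim_equal_rank_matches_py := by
  intro query lookup_data _
  unfold Spec_rank_matches_py
  simp only [rank_matches_py, rank_matches_py_alt]
  rw [pvFoldA, pvFoldB]
  simp only [List.nil_append, List.append_assoc]
  set ql := PySem.Str.lower query with hql
  set xs := (PySem.Dict.ofList lookup_data).items with hxs
  have hk : (xs.map Prod.fst).Nodup := by
    simpa [PySem.Dict.keys] using PySem.Dict.nodup_keys_ofList lookup_data
  have hnd : ∀ f : (String × Int) → Bool, ((xs.filter f).map Prod.fst).Nodup := by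
    intro f
    exact hk.sublist ((xs.filter_sublist (p := f)).map Prod.fst)
  have htag : ∀ (i : Int) (f : (String × Int) → Bool),
      (∀ p, f p = true → pvScore ql p = i) →
      ((xs.filter f).map (fun p => (i, p.1, p.2))) = (xs.filter f).map (pvTag ql) := by
    intro i f hf
    refine List.map_congr_left ?_
    intro p hp
    have := hf p (List.of_mem_filter hp)
    simp [pvTag, this]
  refine PySem.List.sorted_eq_of_perm_of_pairwise_lt _ _ _ ?_ ?_
  · -- permutation
    have hb : ∀ (i : Int) (f : (String × Int) → Bool),
        ((PySem.List.sorted (xs.filter f) (fun p => (toLex p : String ×ₗ Int))).map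
          (fun p => (i, p.1, p.2))).Perm ((xs.filter f).map (fun p => (i, p.1, p.2))) := by
      intro i f
      exact (PySem.List.sorted_perm (xs.filter f) (fun p => (toLex p : String ×ₗ Int)) false).map _
    refine (((hb 3 (pvF3 ql)).append ((hb 2 (pvF2 ql)).append (hb 1 (pvF1 ql)))).trans ?_)
    rw [htag 3 (pvF3 ql) (fun p => pvScoreF3 ql p), htag 2 (pvF2 ql) (fun p => pvScoreF2 ql p),
        htag 1 (pvF1 ql) (fun p => pvScoreF1 ql p)]
    have : (xs.filter (pvF3 ql)).map (pvTag ql) ++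
        ((xs.filter (pvF2 ql)).map (pvTag ql) ++ (xs.filter (pvF1 ql)).map (pvTag ql)) =
        (xs.filter (pvF3 ql) ++ xs.filter (pvF2 ql) ++ xs.filter (pvF1 ql)).map (pvTag ql) := by
      simp [List.map_append, List.append_assoc]
    rw [this]
    exact ((pvPermFilter ql xs).map (pvTag ql)).symm
  · -- strictly increasing under the compound key
    show List.Pairwise (fun a b => pvKeyA a < pvKeyA b) _
    refine (List.pairwise_append).mpr ⟨pvBlockPairwise 3 _ (hnd _), ?_, ?_⟩
    · refine (List.pairwise_append).mpr ⟨pvBlockPairwise 2 _ (hnd _), pvBlockPairwise 1 _ (hnd _), ?_⟩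
      intro a ha b hb
      have h2 := pvBlockScore 2 _ a ha
      have h1 := pvBlockScore 1 _ b hb
      exact pvKeyLtOfScoreGt a b (by omega)
    · intro a ha b hb
      have h3 := pvBlockScore 3 _ a ha
      rcases List.mem_append.mp hb with hb | hb
      · have h2 := pvBlockScore 2 _ b hb
        exact pvKeyLtOfScoreGt a b (by omega)
      · have h1 := pvBlockScore 1 _ b hb
        exact pvKeyLtOfScoreGt a b (by omega)
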